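-- pv_equiv track=rewrite | github.com/AndreiMoraru123/aoc | 2023/d2/solution.py | process_game_line
-- ===== SOURCE A (Python) =====
-- import itertools
-- import operator
-- from typing import Dict, Tuple
-- from functools import reduce
--
-- rules: Dict[str, int] = {
--     'blue': 14,
--     'green': 13,
--     'red': 12,
-- }
--
-- def build_number(sequence: str) -> str:
--     return ''.join([char for char in sequence if char.isnumeric()])
--
-- def validate(color: str, draw: str) -> bool:
--     if color in draw:
--         complete_number = build_number(draw)
--         return int(complete_number) <= rules[color]
--     return True
--
-- def process_game_line(line: str) -> Tuple[str, bool, int]: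
--     game_id, cubes_info = line.strip().split(':')
--     nr = build_number(game_id)
--     min_cubes = {color: 0 for color in rules}
--     sets = cubes_info.split(';')
--
--     draws = list(itertools.chain.from_iterable(map(lambda s: s.split(','), sets)))
--     min_cubes = {color: max((int(build_number(draw)) for draw in draws if color in draw), default=0) for color in rules}
--     power = reduce(operator.mul, min_cubes.values())
--     is_valid_game = all(validate(color, draw) for draw in draws for color in rules)
--     return nr, is_valid_game, power
-- ===== SOURCE B (Python) =====
-- # Single pass over the draw tokens keeping running per-color maxima;
-- # validity and power are derived from the maxima instead of rescanning.
--
-- rules = {'blue': 14, 'green': 13, 'red': 12}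
--
-- def _digits(s):
--     return ''.join(ch for ch in s if ch.isnumeric())
--
-- def process_game_line(line):
--     game_id, cubes_info = line.strip().split(':')
--     nr = _digits(game_id)
--     blue = green = red = 0
--     draws = [d for s in cubes_info.split(';') for d in s.split(',')]
--     for draw in draws:
--         if 'blue' in draw:
--             blue = max(blue, int(_digits(draw)))
--         if 'green' in draw:
--             green = max(green, int(_digits(draw)))
--         if 'red' in draw:
--             red = max(red, int(_digits(draw)))
--     is_valid = blue <= rules['blue'] and green <= rules['green'] and red <= rules['red']
--     return nr, is_valid, blue * green * red
-- ===== Notes on version B (the rewrite author's own statement) =====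
-- stated objective: simpler
-- what changed: One pass over the draw tokens keeps running per-color maxima; validity and power are then derived from the three maxima, replacing A's three max-with-default generator rescans, the reduce over a dict, and the separate all(validate(...)) rescan that re-parses every draw for every color.
import Mathlib
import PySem

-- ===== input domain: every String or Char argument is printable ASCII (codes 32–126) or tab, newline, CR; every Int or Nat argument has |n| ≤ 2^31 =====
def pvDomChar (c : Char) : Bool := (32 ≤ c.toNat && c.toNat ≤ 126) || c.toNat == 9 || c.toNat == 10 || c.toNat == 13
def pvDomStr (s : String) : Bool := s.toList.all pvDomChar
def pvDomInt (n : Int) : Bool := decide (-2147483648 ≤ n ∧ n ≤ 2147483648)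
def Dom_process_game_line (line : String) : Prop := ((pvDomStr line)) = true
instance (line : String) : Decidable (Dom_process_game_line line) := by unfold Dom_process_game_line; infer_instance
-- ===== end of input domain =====

-- B makes one pass over the draw tokens keeping running per-color maxima and derives validity and
-- power from those maxima, instead of A's per-color max-with-default rescans plus a validity rescan (objective: simpler).

-- ===== PORT A =====
-- build_number(s): ''.join(c for c in s if c.isnumeric()); isnumeric = isdigit on the ASCII domain
def pvDigits (cs : List Char) : List Char := cs.filter PySem.Chars.isdigit
-- int(build_number(draw)); Pre_ excludes the inputs where Python raises ValueError (ofChars? = none)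
def pvNum (cs : List Char) : Int := (PySem.Int.ofChars? (pvDigits cs)).getD 0
-- the module-level dict `rules` in insertion order
def pvRules : List (List Char × Int) := [("blue".toList, 14), ("green".toList, 13), ("red".toList, 12)]
-- validate(color, draw), with rules[color] passed as `limit`
def pvValidate (color : List Char) (limit : Int) (draw : List Char) : Bool :=
  if PySem.Chars.isIn color draw then decide (pvNum draw ≤ limit) else true

def process_game_line (line : String) : String × Bool × Int :=
  match PySem.Chars.splitOn (PySem.Chars.strip line.toList) ":".toList with
  | [game_id, cubes_info] =>
    let nr := String.ofList (pvDigits game_id)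
    let _min_cubes := pvRules.map (fun cl => (cl.1, (0 : Int)))  -- dead first assignment, kept for fidelity
    let sets := PySem.Chars.splitOn cubes_info ";".toList
    let draws := sets.flatMap (fun s => PySem.Chars.splitOn s ",".toList)
    let min_cubes := pvRules.map (fun cl =>
      (cl.1, PySem.List.maxD ((draws.filter (fun d => PySem.Chars.isIn cl.1 d)).map pvNum) id 0))
    let vals := min_cubes.map (·.2)
    let power := (vals.drop 1).foldl (· * ·) (vals.headD 0)  -- reduce(operator.mul, values); 3 values, never empty
    let is_valid := draws.all (fun d => pvRules.all (fun cl => pvValidate cl.1 cl.2 d))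
    (nr, is_valid, power)
  | _ => ("", true, 0)  -- unreachable under Pre_: Python raises ValueError on the 2-way unpacking

-- ===== PORT B =====
-- loop body: the three `if 'color' in draw: m = max(m, int(_digits(draw)))` updates on (blue, green, red)
def pvStep (acc : Int × Int × Int) (d : List Char) : Int × Int × Int :=
  let a1 := if PySem.Chars.isIn "blue".toList d then (max acc.1 (pvNum d), acc.2.1, acc.2.2) else acc
  let a2 := if PySem.Chars.isIn "green".toList d then (a1.1, max a1.2.1 (pvNum d), a1.2.2) else a1
  if PySem.Chars.isIn "red".toList d then (a2.1, a2.2.1, max a2.2.2 (pvNum d)) else a2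

def process_game_line_alt (line : String) : String × Bool × Int :=
  let parts := PySem.Chars.splitOn (PySem.Chars.strip line.toList) ":".toList
  -- the 2-way unpacking `game_id, cubes_info = line.strip().split(':')`
  if parts.length = 2 then
    let game_id := parts.headD []
    let cubes_info := parts.tail.headD []
    let nr := String.ofList (pvDigits game_id)
    let draws := (PySem.Chars.splitOn cubes_info ";".toList).flatMap (fun s => PySem.Chars.splitOn s ",".toList)
    let m := draws.foldl pvStep (0, 0, 0)
    (nr, decide (m.1 ≤ 14) && (decide (m.2.1 ≤ 13) && decide (m.2.2 ≤ 12)), m.1 * m.2.1 * m.2.2)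
  else ("", true, 0)  -- unreachable under Pre_: Python raises ValueError on the 2-way unpacking

-- ===== PRECONDITION & SPEC =====
-- Pre_: the stripped line splits on ':' into exactly two pieces (otherwise the 2-way unpacking raises
-- ValueError), and every draw token mentioning a color has int()-parsable digits (otherwise int('')
-- raises ValueError).  B raises in Python on exactly the same inputs, so Pre_ excludes only inputs
-- where both A and B raise.
def Pre_process_game_line (line : String) : Prop :=
  (PySem.Chars.splitOn (PySem.Chars.strip line.toList) ":".toList).length = 2 ∧
  ∀ d ∈ (PySem.Chars.splitOn
            ((PySem.Chars.splitOn (PySem.Chars.strip line.toList) ":".toList).getD 1 []) ";".toList).flatMap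
          (fun s => PySem.Chars.splitOn s ",".toList),
    (PySem.Chars.isIn "blue".toList d = true ∨ PySem.Chars.isIn "green".toList d = true ∨
        PySem.Chars.isIn "red".toList d = true) →
    PySem.Int.ofChars? (d.filter PySem.Chars.isdigit) ≠ none

instance (line : String) : Decidable (Pre_process_game_line line) := by
  unfold Pre_process_game_line; infer_instance

def pvWitness_process_game_line : String := "Game 1: 3 blue, 4 red; 2 green"

def Spec_process_game_line (line : String) (out : String × Bool × Int) : Prop := out = process_game_line_alt line
instance (line : String) (out : String × Bool × Int) : Decidable (Spec_process_game_line line out) := by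
  unfold Spec_process_game_line; infer_instance

-- ===== CLAIM (what is proved, stated in full; the proofs are below) =====
def Claim_equal_process_game_line : Prop := ∀ (line : String), Dom_process_game_line line → Pre_process_game_line line → Spec_process_game_line line (process_game_line line)

-- ===== LEMMAS AND PROOFS =====

theorem pv_digit_not_space (c : Char) (h : PySem.Chars.isdigit c = true) :
    PySem.Int.isIntSpace c = false := by
  by_contra hns
  simp only [Bool.not_eq_false] at hns
  simp only [PySem.Int.isIntSpace, Bool.or_eq_true, decide_eq_true_eq] at hns
  rcases hns with ((((rfl | rfl) | rfl) | rfl) | rfl) | rfl <;> revert h <;> decide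

theorem pv_dropWhile_digits (l : List Char) (hl : ∀ c ∈ l, PySem.Chars.isdigit c = true) :
    List.dropWhile PySem.Int.isIntSpace l = l := by
  rw [List.dropWhile_eq_self_iff]
  intro h0
  simp [pv_digit_not_space _ (hl _ (l.getElem_mem h0))]

-- helper for the '+'/no-sign branches of int(): a mapped Nat value is nonnegative
theorem pv_map_bind_nonneg (X : Option Nat) (n : Int)
    (h : Option.map (fun n => n) (X >>= fun a => pure ((a : Int))) = some n) : 0 ≤ n := by
  cases X with
  | none => simp at h
  | some a =>
    have h' : some ((a : Int)) = some n := h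
    injection h' with h2
    rw [← h2]
    exact Int.natCast_nonneg a

-- int() of a digit-only string never returns a negative value
theorem pv_ofChars?_digits_nonneg (cs : List Char) (h : ∀ c ∈ cs, PySem.Chars.isdigit c = true)
    (n : Int) (hn : PySem.Int.ofChars? cs = some n) : 0 ≤ n := by
  have hdash : PySem.Chars.isdigit '-' = false := by decide
  unfold PySem.Int.ofChars? at hn
  rw [pv_dropWhile_digits cs h] at hn
  rw [pv_dropWhile_digits cs.reverse (by intro c hc; exact h c (List.mem_reverse.mp hc))] at hn
  rw [List.reverse_reverse] at hn
  dsimp only at hn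
  split at hn
  · exfalso; simp_all
  · exact pv_map_bind_nonneg _ n hn
  · exact pv_map_bind_nonneg _ n hn

theorem pv_pvNum_nonneg (d : List Char)
    (h : PySem.Int.ofChars? (d.filter PySem.Chars.isdigit) ≠ none) : 0 ≤ pvNum d := by
  obtain ⟨n, hn⟩ := Option.ne_none_iff_exists'.mp h
  have := pv_ofChars?_digits_nonneg (d.filter PySem.Chars.isdigit)
    (fun c hc => (List.mem_filter.mp hc).2) n hn
  simpa [pvNum, pvDigits, hn]

theorem pv_foldl_max_le_iff (t : List Int) (a L : Int) :
    t.foldl max a ≤ L ↔ a ≤ L ∧ ∀ y ∈ t, y ≤ L := by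
  induction t generalizing a with
  | nil => simp
  | cons x xs ih =>
    simp only [List.foldl_cons, ih, max_le_iff, List.mem_cons]
    constructor
    · rintro ⟨⟨h1, h2⟩, h3⟩; exact ⟨h1, fun y hy => by rcases hy with rfl | hy; exact h2; exact h3 y hy⟩
    · rintro ⟨h1, h2⟩; exact ⟨⟨h1, h2 x (Or.inl rfl)⟩, fun y hy => h2 y (Or.inr hy)⟩

theorem pv_max?_cons (t : List Int) : ∀ a : Int,
    PySem.List.max? (a :: t) id = some (t.foldl max a) := by
  induction t with
  | nil => intro a; rfl
  | cons x ts ih =>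
    intro a
    have key : PySem.List.max? (a :: x :: ts) id = PySem.List.max? (max a x :: ts) id := by
      show List.foldl _ none (a :: x :: ts) = List.foldl _ none (max a x :: ts)
      rw [List.foldl_cons, List.foldl_cons, List.foldl_cons]
      congr 1
      show (if id a < id x then some x else some a) = some (max a x)
      simp only [id_eq]
      rcases lt_or_ge a x with hax | hax
      · rw [if_pos hax, max_eq_right hax.le]
      · rw [if_neg (not_lt.mpr hax), max_eq_left hax]
    rw [key, ih (max a x), List.foldl_cons]

theorem pv_maxD_eq_foldl (nums : List Int) (h : ∀ x ∈ nums, 0 ≤ x) :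
    PySem.List.maxD nums id 0 = nums.foldl max 0 := by
  cases nums with
  | nil => rfl
  | cons x t =>
    have hx : max 0 x = x := max_eq_right (h x (by simp))
    show (PySem.List.max? (x :: t) id).getD 0 = _
    rw [pv_max?_cons t x, Option.getD_some, List.foldl_cons, hx]

-- the B fold is the triple of the three independent per-color max folds
theorem pv_fold_triple (draws : List (List Char)) (b g r : Int) :
    draws.foldl pvStep (b, g, r) =
      (draws.foldl (fun m d => if PySem.Chars.isIn "blue".toList d then max m (pvNum d) else m) b,
       draws.foldl (fun m d => if PySem.Chars.isIn "green".toList d then max m (pvNum d) else m) g,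
       draws.foldl (fun m d => if PySem.Chars.isIn "red".toList d then max m (pvNum d) else m) r) := by
  induction draws generalizing b g r with
  | nil => rfl
  | cons d t ih => simp only [List.foldl_cons, pvStep]; split_ifs <;> simp [ih]

theorem pv_color_fold_eq (draws : List (List Char)) (cl : List Char)
    (h : ∀ d ∈ draws, PySem.Chars.isIn cl d = true →
          PySem.Int.ofChars? (d.filter PySem.Chars.isdigit) ≠ none) :
    PySem.List.maxD ((draws.filter (fun d => PySem.Chars.isIn cl d)).map pvNum) id 0 =
      draws.foldl (fun m d => if PySem.Chars.isIn cl d then max m (pvNum d) else m) 0 := by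
  rw [pv_maxD_eq_foldl, List.foldl_map, List.foldl_filter]
  intro x hx
  obtain ⟨d, hd, hx⟩ := List.mem_map.mp hx
  obtain ⟨hdm, hin⟩ := List.mem_filter.mp hd
  exact hx ▸ pv_pvNum_nonneg d (h d hdm hin)

theorem pv_all_validate (draws : List (List Char)) (cl : List Char) (L : Int) (hL : 0 ≤ L) :
    draws.all (fun d => pvValidate cl L d) =
      decide (draws.foldl (fun m d => if PySem.Chars.isIn cl d then max m (pvNum d) else m) 0 ≤ L) := by
  have hfold :
      draws.foldl (fun m d => if PySem.Chars.isIn cl d then max m (pvNum d) else m) 0 =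
        ((draws.filter (fun d => PySem.Chars.isIn cl d)).map pvNum).foldl max 0 := by
    rw [List.foldl_map, List.foldl_filter]
  rw [Bool.eq_iff_iff, List.all_eq_true]
  simp only [decide_eq_true_eq, hfold, pv_foldl_max_le_iff]
  constructor
  · intro hall
    refine ⟨hL, ?_⟩
    intro y hy
    obtain ⟨d, hd, rfl⟩ := List.mem_map.mp hy
    obtain ⟨hdm, hin⟩ := List.mem_filter.mp hd
    have := hall d hdm
    simpa [pvValidate, hin] using this
  · rintro ⟨-, hall⟩ d hd
    by_cases hin : PySem.Chars.isIn cl d = true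
    · have := hall (pvNum d) (List.mem_map.mpr ⟨d, List.mem_filter.mpr ⟨hd, hin⟩, rfl⟩)
      simp [pvValidate, hin, this]
    · simp [pvValidate, hin]

theorem pv_all_split3 (l : List (List Char)) (f g h : List Char → Bool) :
    l.all (fun d => f d && (g d && h d)) = (l.all f && (l.all g && l.all h)) := by
  induction l with
  | nil => rfl
  | cons x t ih =>
    simp only [List.all_cons, ih]
    cases f x <;> cases g x <;> cases h x <;> simp

theorem pv_main (line : String) (hp : Pre_process_game_line line) :
    process_game_line line = process_game_line_alt line := by
  obtain ⟨hlen, hnum⟩ := hp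
  rcases hparts : PySem.Chars.splitOn (PySem.Chars.strip line.toList) ":".toList with
    _ | ⟨gid, _ | ⟨ci, rest⟩⟩
  · rw [hparts] at hlen; simp at hlen
  · rw [hparts] at hlen; simp at hlen
  · rw [hparts] at hlen
    simp only [List.length_cons] at hlen
    have hrest : rest = [] := by
      cases rest with
      | nil => rfl
      | cons _ _ => simp at hlen
    subst hrest
    rw [hparts] at hnum
    simp only [List.getD, List.getElem?_cons_succ, List.getElem?_cons_zero, Option.getD_some] at hnum
    simp only [process_game_line, process_game_line_alt, hparts]
    rw [if_pos (show (gid :: ci :: List.nil (α := List Char)).length = 2 from by simp)]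
    simp only [List.headD_cons, List.tail_cons]
    simp only [pv_fold_triple]
    have hblue := pv_color_fold_eq ((PySem.Chars.splitOn ci ";".toList).flatMap (fun s => PySem.Chars.splitOn s ",".toList)) "blue".toList
      (fun d hd hin => hnum d hd (Or.inl hin))
    have hgreen := pv_color_fold_eq ((PySem.Chars.splitOn ci ";".toList).flatMap (fun s => PySem.Chars.splitOn s ",".toList)) "green".toList
      (fun d hd hin => hnum d hd (Or.inr (Or.inl hin)))
    have hred := pv_color_fold_eq ((PySem.Chars.splitOn ci ";".toList).flatMap (fun s => PySem.Chars.splitOn s ",".toList)) "red".toList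
      (fun d hd hin => hnum d hd (Or.inr (Or.inr hin)))
    refine Prod.ext rfl (Prod.ext ?_ ?_)
    · -- validity component
      simp only [pvRules, List.all_cons, List.all_nil, Bool.and_true, pv_all_split3,
        pv_all_validate ((PySem.Chars.splitOn ci ";".toList).flatMap (fun s => PySem.Chars.splitOn s ",".toList)) "blue".toList 14 (by norm_num),
        pv_all_validate ((PySem.Chars.splitOn ci ";".toList).flatMap (fun s => PySem.Chars.splitOn s ",".toList)) "green".toList 13 (by norm_num),
        pv_all_validate ((PySem.Chars.splitOn ci ";".toList).flatMap (fun s => PySem.Chars.splitOn s ",".toList)) "red".toList 12 (by norm_num)]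
      try rfl
    · -- power component
      simp only [pvRules, List.map_cons, List.map_nil, List.drop_succ_cons, List.drop_zero,
        List.foldl_cons, List.foldl_nil, List.headD_cons]
      rw [hblue, hgreen, hred]
      try rfl

-- ===== VERDICT (by name: the statement is the Claim_ definition above) =====
theorem process_game_line_spec : Claim_equal_process_game_line := by
  intro line _ hp
  unfold Spec_process_game_line
  exact pv_main line hp
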